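-- pv_equiv track=rewrite | github.com/vcpandya/aicmd | src/zx/ui.py | _assign_phases
-- ===== SOURCE A (Python) =====
-- def _assign_phases(risk_labels: list[str]) -> list[str]:
--     """Derive EXPLORE / EXECUTE / VERIFY phases from risk classifications."""
--     n = len(risk_labels)
--     if n == 0:
--         return []
--     # Find last MODERATE/DANGEROUS step
--     last_modify = -1
--     for i, r in enumerate(risk_labels):
--         if r in ("MODERATE", "DANGEROUS"):
--             last_modify = i
--     phases = []
--     for i, r in enumerate(risk_labels):
--         if r in ("MODERATE", "DANGEROUS"):
--             phases.append("EXECUTE")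
--         elif i > last_modify and last_modify >= 0:
--             phases.append("VERIFY")
--         else:
--             phases.append("EXPLORE")
--     return phases
-- ===== SOURCE B (Python) =====
-- def _assign_phases(risk_labels: list[str]) -> list[str]:
--     """Derive EXPLORE / EXECUTE / VERIFY phases from risk classifications."""
--     if not any(r in ("MODERATE", "DANGEROUS") for r in risk_labels):
--         return ["EXPLORE"] * len(risk_labels)
--     seen_modify = False
--     out = []
--     for r in reversed(risk_labels):
--         if r in ("MODERATE", "DANGEROUS"):
--             out.append("EXECUTE")
--             seen_modify = True
--         elif not seen_modify:
--             out.append("VERIFY")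
--         else:
--             out.append("EXPLORE")
--     out.reverse()
--     return out
-- ===== Notes on version B (the rewrite author's own statement) =====
-- stated objective: alternative
-- what changed: Replaces A's two forward passes (index search for the last MODERATE/DANGEROUS, then an index-comparing map) with an any() degenerate-case guard plus a single backward pass carrying a seen_modify boolean, reversed at the end.
import Mathlib
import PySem

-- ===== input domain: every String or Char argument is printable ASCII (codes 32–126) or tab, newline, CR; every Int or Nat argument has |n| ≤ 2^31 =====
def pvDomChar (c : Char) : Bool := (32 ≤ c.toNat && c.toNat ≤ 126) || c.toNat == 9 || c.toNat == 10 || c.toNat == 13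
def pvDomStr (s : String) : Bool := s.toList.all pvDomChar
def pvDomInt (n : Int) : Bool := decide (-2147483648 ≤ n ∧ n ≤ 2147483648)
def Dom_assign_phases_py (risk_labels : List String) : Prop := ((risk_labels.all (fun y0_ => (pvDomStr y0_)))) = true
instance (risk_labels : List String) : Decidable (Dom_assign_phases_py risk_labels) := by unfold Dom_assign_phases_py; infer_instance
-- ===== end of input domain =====

-- B replaces A's two forward passes (last-modify index search + index-comparing map) with an
-- any() guard plus one backward pass carrying a seen_modify flag; same result, alternative structure.

-- r in ("MODERATE", "DANGEROUS")
def pvIsMod (r : String) : Bool := r == "MODERATE" || r == "DANGEROUS"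

-- ===== PORT A =====
def assign_phases_py (risk_labels : List String) : List String :=
  if risk_labels.length = 0 then []
  else
    let last_modify : Int :=
      (PySem.List.enumerate risk_labels).foldl
        (fun last_modify p => if pvIsMod p.2 then p.1 else last_modify) (-1)
    (PySem.List.enumerate risk_labels).foldl
      (fun phases p =>
        phases ++ [if pvIsMod p.2 then "EXECUTE"
                   else if p.1 > last_modify ∧ last_modify ≥ 0 then "VERIFY"
                   else "EXPLORE"]) []

-- ===== PORT B =====
def assign_phases_py_alt (risk_labels : List String) : List String :=
  if !risk_labels.any (fun r => pvIsMod r) then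
    List.replicate risk_labels.length "EXPLORE"
  else
    let st := risk_labels.reverse.foldl
      (fun (st : Bool × List String) r =>
        if pvIsMod r then (true, st.2 ++ ["EXECUTE"])
        else if !st.1 then (st.1, st.2 ++ ["VERIFY"])
        else (st.1, st.2 ++ ["EXPLORE"])) (false, [])
    st.2.reverse

-- ===== PRECONDITION & SPEC =====
def Spec_assign_phases_py (risk_labels : List String) (out : List String) : Prop := out = assign_phases_py_alt risk_labels
instance (risk_labels : List String) (out : List String) : Decidable (Spec_assign_phases_py risk_labels out) := by unfold Spec_assign_phases_py; infer_instance

-- ===== CLAIM (what is proved, stated in full; the proofs are below) =====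
def Claim_equal_assign_phases_py : Prop := ∀ (risk_labels : List String), Dom_assign_phases_py risk_labels → Spec_assign_phases_py risk_labels (assign_phases_py risk_labels)

-- ===== LEMMAS AND PROOFS =====

-- reference: processes the list from the right; fst = "a MODERATE/DANGEROUS occurs", snd = phases
-- assuming at least one MODERATE/DANGEROUS occurs somewhere in the whole list
def pvRef : List String → Bool × List String
  | [] => (false, [])
  | r :: xs =>
    let p := pvRef xs
    if pvIsMod r then (true, "EXECUTE" :: p.2)
    else (p.1, (if p.1 then "EXPLORE" else "VERIFY") :: p.2)

theorem pvRef_fst (l : List String) : (pvRef l).1 = l.any pvIsMod := by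
  induction l with
  | nil => rfl
  | cons r xs ih =>
    simp only [pvRef, List.any_cons]
    by_cases h : pvIsMod r = true <;> simp [h, ih]

theorem pvRef_append_mod (l : List String) (x : String) (hx : pvIsMod x = true) :
    (pvRef (l ++ [x])).2 =
      l.map (fun r => if pvIsMod r then "EXECUTE" else "EXPLORE") ++ ["EXECUTE"] := by
  induction l with
  | nil => simp [pvRef, hx]
  | cons r xs ih =>
    simp only [List.cons_append, pvRef, pvRef_fst, List.any_append, List.any_cons, hx]
    by_cases h : pvIsMod r = true <;> simp [h, ih]

theorem pvRef_append_notmod (l : List String) (x : String) (hx : pvIsMod x = false) :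
    pvRef (l ++ [x]) = ((pvRef l).1, (pvRef l).2 ++ ["VERIFY"]) := by
  induction l with
  | nil => simp [pvRef, hx]
  | cons r xs ih =>
    simp only [List.cons_append, pvRef, ih]
    by_cases h : pvIsMod r = true <;> simp [h]

-- B's backward fold computes pvRef's phases in reverse
theorem pvB_fold (l : List String) :
    l.reverse.foldl
      (fun (st : Bool × List String) r =>
        if pvIsMod r then (true, st.2 ++ ["EXECUTE"])
        else if !st.1 then (st.1, st.2 ++ ["VERIFY"])
        else (st.1, st.2 ++ ["EXPLORE"])) (false, []) =
      (l.any pvIsMod, (pvRef l).2.reverse) := by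
  induction l with
  | nil => rfl
  | cons x xs ih =>
    rw [List.reverse_cons, List.foldl_append, ih]
    simp only [List.foldl_cons, List.foldl_nil, pvRef, pvRef_fst, List.any_cons]
    by_cases hx : pvIsMod x = true
    · simp [hx]
    · by_cases hs : xs.any pvIsMod = true <;> simp [hx, hs]

theorem pvB_char (l : List String) :
    assign_phases_py_alt l =
      if l.any pvIsMod then (pvRef l).2 else List.replicate l.length "EXPLORE" := by
  unfold assign_phases_py_alt
  by_cases h : l.any (fun r => pvIsMod r) = true
  · simp only [h, Bool.not_true, Bool.false_eq_true, if_false]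
    rw [pvB_fold]
    simp
  · simp only [Bool.not_eq_true] at h
    simp [h]

-- A's last_modify, as a standalone definition (definitionally A's inner foldl)
def pvLm (l : List String) : Int :=
  (PySem.List.enumerate l).foldl (fun last_modify p => if pvIsMod p.2 then p.1 else last_modify) (-1)

theorem pvEnumerate_append_singleton (l : List String) (x : String) : ∀ s : Int,
    PySem.List.enumerate (l ++ [x]) s = PySem.List.enumerate l s ++ [((s + l.length : Int), x)] := by
  induction l with
  | nil => intro s; simp [PySem.List.enumerate_cons, PySem.List.enumerate_nil]
  | cons r xs ih =>
    intro s
    simp only [List.cons_append, PySem.List.enumerate_cons, ih (s + 1), List.length_cons]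
    have h12 : s + 1 + (xs.length : Int) = s + ((xs.length + 1 : Nat) : Int) := by push_cast; ring
    rw [h12]

theorem pvLm_append (l : List String) (x : String) :
    pvLm (l ++ [x]) = if pvIsMod x then (l.length : Int) else pvLm l := by
  unfold pvLm
  rw [pvEnumerate_append_singleton l x 0, List.foldl_append]
  simp

theorem pvLm_spec (l : List String) :
    (l.any pvIsMod = true ∧ 0 ≤ pvLm l ∧ pvLm l < l.length) ∨
    (l.any pvIsMod = false ∧ pvLm l = -1) := by
  induction l using List.reverseRecOn with
  | nil => right; exact ⟨rfl, rfl⟩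
  | append_singleton xs x ih =>
    rw [pvLm_append]
    by_cases hx : pvIsMod x = true
    · left
      refine ⟨by simp [hx], by simp [hx], ?_⟩
      simp [hx]
    · have hx' : pvIsMod x = false := by simpa using hx
      rcases ih with ⟨ha, h0, h1⟩ | ⟨ha, he⟩
      · left
        refine ⟨by simp [ha], by simp [hx', h0], ?_⟩
        simp only [hx', Bool.false_eq_true, if_false, List.length_append]
        have : (xs.length : Int) ≤ ((xs.length + [x].length : Nat) : Int) := by push_cast; omega
        omega
      · right
        exact ⟨by simp [ha, hx'], by simp [hx', he]⟩

-- indices of enumerate l s are all < s + l.length, so with last_modify ≥ s + l.length - 1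
-- the VERIFY branch never fires
theorem pvEnum_map_le (l : List String) (lm : Int) : ∀ s : Int, s + l.length ≤ lm + 1 →
    (PySem.List.enumerate l s).map
      (fun p => if pvIsMod p.2 then "EXECUTE"
                else if p.1 > lm ∧ lm ≥ 0 then "VERIFY" else "EXPLORE") =
      l.map (fun r => if pvIsMod r then "EXECUTE" else "EXPLORE") := by
  induction l with
  | nil => intro s _; rfl
  | cons r xs ih =>
    intro s hs
    simp only [List.length_cons] at hs
    push_cast at hs
    simp only [PySem.List.enumerate_cons, List.map_cons, ih (s + 1) (by omega)]
    by_cases h : pvIsMod r = true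
    · simp [h]
    · have hns : ¬ (s > lm ∧ lm ≥ 0) := by
        intro ⟨h1, _⟩
        have : (0:Int) ≤ xs.length := by positivity
        omega
      simp [h, hns]

theorem pvEnum_map_nomod (l : List String) (h : l.any pvIsMod = false) : ∀ s : Int,
    (PySem.List.enumerate l s).map
      (fun p => if pvIsMod p.2 then "EXECUTE"
                else if p.1 > (-1 : Int) ∧ (-1 : Int) ≥ 0 then "VERIFY" else "EXPLORE") =
      List.replicate l.length "EXPLORE" := by
  induction l with
  | nil => intro s; rfl
  | cons r xs ih =>
    intro s
    simp only [List.any_cons, Bool.or_eq_false_iff] at h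
    simp only [PySem.List.enumerate_cons, List.map_cons, List.length_cons, List.replicate_succ,
      ih h.2 (s + 1), h.1]
    simp

theorem pvA_char (l : List String) :
    assign_phases_py l =
      if l.any pvIsMod then (pvRef l).2 else List.replicate l.length "EXPLORE" := by
  induction l using List.reverseRecOn with
  | nil => rfl
  | append_singleton xs x ih =>
    have hlen : (xs ++ [x]).length ≠ 0 := by simp
    have hfold : ∀ (E : List (Int × String)) (lm : Int),
        E.foldl (fun phases p =>
          phases ++ [if pvIsMod p.2 then "EXECUTE"
                     else if p.1 > lm ∧ lm ≥ 0 then "VERIFY" else "EXPLORE"]) [] =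
        E.map (fun p => if pvIsMod p.2 then "EXECUTE"
                        else if p.1 > lm ∧ lm ≥ 0 then "VERIFY" else "EXPLORE") := by
      intro E lm
      simpa using PySem.List.foldl_append_singleton_eq_map _ E []
    have hA : assign_phases_py (xs ++ [x]) =
        (PySem.List.enumerate (xs ++ [x])).map
          (fun p => if pvIsMod p.2 then "EXECUTE"
                    else if p.1 > pvLm (xs ++ [x]) ∧ pvLm (xs ++ [x]) ≥ 0 then "VERIFY"
                    else "EXPLORE") := by
      unfold assign_phases_py
      rw [if_neg hlen]
      exact hfold _ _
    rw [hA, pvEnumerate_append_singleton xs x 0, List.map_append, pvLm_append]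
    by_cases hx : pvIsMod x = true
    · -- last element is MODERATE/DANGEROUS: last_modify = xs.length, prefix all ≤ last_modify
      simp only [hx, if_true]
      rw [pvEnum_map_le xs (xs.length : Int) 0 (by omega)]
      have hany : (xs ++ [x]).any pvIsMod = true := by simp [hx]
      rw [if_pos hany, pvRef_append_mod xs x hx]
      simp [hx]
    · have hx' : pvIsMod x = false := by simpa using hx
      simp only [hx', Bool.false_eq_true, if_false, List.map_cons, List.map_nil]
      rcases pvLm_spec xs with ⟨ha, h0, h1⟩ | ⟨ha, he⟩
      · -- some modify in xs: last element gets VERIFY, prefix phases unchanged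
        have hpre : assign_phases_py xs =
            (PySem.List.enumerate xs).map
              (fun p => if pvIsMod p.2 then "EXECUTE"
                        else if p.1 > pvLm xs ∧ pvLm xs ≥ 0 then "VERIFY" else "EXPLORE") := by
          unfold assign_phases_py
          cases xs with
          | nil => simp at ha
          | cons y ys => exact (if_neg (by simp)).trans (hfold _ _)
        rw [← hpre, ih, if_pos ha]
        have hany : (xs ++ [x]).any pvIsMod = true := by simp [ha]
        rw [if_pos hany, pvRef_append_notmod xs x hx',
          if_pos (show (0 : Int) + xs.length > pvLm xs ∧ pvLm xs ≥ 0 from ⟨by omega, h0⟩)]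
      · -- no modify anywhere: everything EXPLORE
        rw [he, pvEnum_map_nomod xs ha 0,
          if_neg (show ¬ ((0 : Int) + xs.length > (-1 : Int) ∧ (-1 : Int) ≥ 0) from
            fun h => by omega)]
        have hanyf : (xs ++ [x]).any pvIsMod = false := by simp [ha, hx']
        rw [if_neg (by simp [hanyf]),
          show (xs ++ [x]).length = xs.length + 1 by simp, List.replicate_succ']

-- ===== VERDICT (by name: the statement is the Claim_ definition above) =====
theorem assign_phases_py_spec : Claim_equal_assign_phases_py := by
  intro l _
  unfold Spec_assign_phases_py
  rw [pvA_char, pvB_char]
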